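-- pv_equiv track=rewrite | github.com/AutoTreeGen/TreeGen | packages/inference-engine/src/inference_engine/detectors/famous_overclaim.py | _ordered_flags
-- ===== SOURCE A (Python) =====
-- FLAG_ROYAL_RASHI_CHAIN = "royal_rashi_king_david_public_tree_chain"
--
-- FLAG_SCHNEERSON_BESHT = "rabbinical_schneerson_to_baal_shem_tov"
--
-- FLAG_TITLE_SURNAME_AS_PROOF = "rabbinical_title_or_surname_as_proof"
--
-- FLAG_TINY_DNA_MEDIEVAL = "tiny_dna_match_used_for_medieval_descent"
--
-- FLAG_SAME_NAME_FALSE_MERGE = "same_name_rabbinical_surname_false_merge"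
--
-- FLAG_PUBLIC_TREE_NO_PRIMARY_BRIDGE = "public_tree_famous_descent_no_primary_bridge"
--
-- FLAG_FAMOUS_QUARANTINE_REQUIRED = "famous_descent_quarantine_required"
--
-- def _ordered_flags(flags: set[str]) -> list[str]:
--     order = [
--         FLAG_ROYAL_RASHI_CHAIN,
--         FLAG_SCHNEERSON_BESHT,
--         FLAG_TITLE_SURNAME_AS_PROOF,
--         FLAG_TINY_DNA_MEDIEVAL,
--         FLAG_SAME_NAME_FALSE_MERGE,
--         FLAG_PUBLIC_TREE_NO_PRIMARY_BRIDGE,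
--         FLAG_FAMOUS_QUARANTINE_REQUIRED,
--     ]
--     return [flag for flag in order if flag in flags]
-- ===== SOURCE B (Python) =====
-- FLAG_ROYAL_RASHI_CHAIN = "royal_rashi_king_david_public_tree_chain"
-- FLAG_SCHNEERSON_BESHT = "rabbinical_schneerson_to_baal_shem_tov"
-- FLAG_TITLE_SURNAME_AS_PROOF = "rabbinical_title_or_surname_as_proof"
-- FLAG_TINY_DNA_MEDIEVAL = "tiny_dna_match_used_for_medieval_descent"
-- FLAG_SAME_NAME_FALSE_MERGE = "same_name_rabbinical_surname_false_merge"
-- FLAG_PUBLIC_TREE_NO_PRIMARY_BRIDGE = "public_tree_famous_descent_no_primary_bridge"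
-- FLAG_FAMOUS_QUARANTINE_REQUIRED = "famous_descent_quarantine_required"
--
--
-- def _ordered_flags(flags: set[str]) -> list[str]:
--     priority = {
--         FLAG_ROYAL_RASHI_CHAIN: 0,
--         FLAG_SCHNEERSON_BESHT: 1,
--         FLAG_TITLE_SURNAME_AS_PROOF: 2,
--         FLAG_TINY_DNA_MEDIEVAL: 3,
--         FLAG_SAME_NAME_FALSE_MERGE: 4,
--         FLAG_PUBLIC_TREE_NO_PRIMARY_BRIDGE: 5,
--         FLAG_FAMOUS_QUARANTINE_REQUIRED: 6,
--     }
--     kept = [f for f in flags if f in priority]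
--     return sorted(kept, key=lambda f: priority[f])
-- ===== Notes on version B (the rewrite author's own statement) =====
-- stated objective: alternative
-- what changed: B builds an explicit flag->rank dict, filters the input set by dict membership, and sorts the kept flags by rank, instead of A's scan of the canonical order list with a membership test per element.
import Mathlib
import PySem

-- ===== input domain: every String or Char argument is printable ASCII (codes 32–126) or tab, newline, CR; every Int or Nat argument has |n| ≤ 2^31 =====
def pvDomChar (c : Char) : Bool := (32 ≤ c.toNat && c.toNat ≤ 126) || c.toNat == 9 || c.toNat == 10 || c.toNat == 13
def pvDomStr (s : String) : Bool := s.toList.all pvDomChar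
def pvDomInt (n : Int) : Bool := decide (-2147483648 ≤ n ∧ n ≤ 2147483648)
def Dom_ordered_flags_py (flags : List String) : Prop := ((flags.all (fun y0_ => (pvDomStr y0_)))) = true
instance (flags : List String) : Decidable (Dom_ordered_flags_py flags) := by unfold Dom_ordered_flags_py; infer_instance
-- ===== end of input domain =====

-- ===== PORT A =====
-- B: ranks each flag via a dict built once and sorts the input by rank, instead of
-- scanning the fixed order list with a membership test (objective: alternative).
-- The canonical order of flags (the module-level FLAG_* constants, in A's list order).
def pvOrder : List String :=
  [ "royal_rashi_king_david_public_tree_chain"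
  , "rabbinical_schneerson_to_baal_shem_tov"
  , "rabbinical_title_or_surname_as_proof"
  , "tiny_dna_match_used_for_medieval_descent"
  , "same_name_rabbinical_surname_false_merge"
  , "public_tree_famous_descent_no_primary_bridge"
  , "famous_descent_quarantine_required" ]

def ordered_flags_py (flags : List String) : List String :=
  pvOrder.filter (fun flag => flags.contains flag)

-- ===== PORT B =====
-- priority = {FLAG_ROYAL_RASHI_CHAIN: 0, ..., FLAG_FAMOUS_QUARANTINE_REQUIRED: 6}
def pvPriority : PySem.Dict String Int := PySem.Dict.ofList
  [ ("royal_rashi_king_david_public_tree_chain", 0)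
  , ("rabbinical_schneerson_to_baal_shem_tov", 1)
  , ("rabbinical_title_or_surname_as_proof", 2)
  , ("tiny_dna_match_used_for_medieval_descent", 3)
  , ("same_name_rabbinical_surname_false_merge", 4)
  , ("public_tree_famous_descent_no_primary_bridge", 5)
  , ("famous_descent_quarantine_required", 6) ]

def ordered_flags_py_alt (flags : List String) : List String :=
  let kept := flags.filter (fun f => pvPriority.contains f)
  PySem.List.sorted kept (fun f => pvPriority.getD f 0) false

-- ===== PRECONDITION & SPEC =====
-- Pre_ excludes lists with duplicate elements: the Python parameter is a set[str],
-- so a duplicate-carrying list is outside the function's contract (A ignores the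
-- duplicate, B would keep both — a defensible-corner artefact of the list encoding).
def Pre_ordered_flags_py (flags : List String) : Prop := flags.Nodup
instance (flags : List String) : Decidable (Pre_ordered_flags_py flags) := by unfold Pre_ordered_flags_py; infer_instance
def pvWitness_ordered_flags_py : List String :=
  ["zzz", "famous_descent_quarantine_required", "royal_rashi_king_david_public_tree_chain"]
def Spec_ordered_flags_py (flags : List String) (out : List String) : Prop := out = ordered_flags_py_alt flags
instance (flags : List String) (out : List String) : Decidable (Spec_ordered_flags_py flags out) := by unfold Spec_ordered_flags_py; infer_instance

-- ===== CLAIM (what is proved, stated in full; the proofs are below) =====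
def Claim_equal_ordered_flags_py : Prop := ∀ (flags : List String), Dom_ordered_flags_py flags → Pre_ordered_flags_py flags → Spec_ordered_flags_py flags (ordered_flags_py flags)

-- ===== LEMMAS AND PROOFS =====
-- pvPriority, fully evaluated.
theorem pvPriority_eq : pvPriority = PySem.Dict.mk
    [ ("royal_rashi_king_david_public_tree_chain", 0)
    , ("rabbinical_schneerson_to_baal_shem_tov", 1)
    , ("rabbinical_title_or_surname_as_proof", 2)
    , ("tiny_dna_match_used_for_medieval_descent", 3)
    , ("same_name_rabbinical_surname_false_merge", 4)
    , ("public_tree_famous_descent_no_primary_bridge", 5)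
    , ("famous_descent_quarantine_required", 6) ] := by decide

theorem contains_priority (a : String) : pvPriority.contains a = true ↔ a ∈ pvOrder := by
  rw [pvPriority_eq]
  simp only [pvOrder, PySem.Dict.contains_mk, List.any_cons, List.any_nil,
    List.mem_cons, List.not_mem_nil, or_false, eq_comm]
  simp only [Bool.true_eq, Bool.or_eq_true, beq_iff_eq, Bool.false_eq_true, or_false]
  tauto

theorem order_pairwise : pvOrder.Pairwise (fun a b => pvPriority.getD a 0 < pvPriority.getD b 0) := by
  rw [pvPriority_eq]; decide

theorem order_nodup : pvOrder.Nodup := by decide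

-- ===== VERDICT (by name: the statement is the Claim_ definition above) =====
theorem ordered_flags_py_spec : Claim_equal_ordered_flags_py := by
  intro flags _ hnd
  unfold Spec_ordered_flags_py ordered_flags_py ordered_flags_py_alt
  have hperm : (pvOrder.filter (fun flag => flags.contains flag)).Perm
      (flags.filter (fun f => pvPriority.contains f)) := by
    rw [List.perm_ext_iff_of_nodup (order_nodup.filter _) (hnd.filter _)]
    intro a
    simp only [List.mem_filter, List.contains_eq_mem, decide_eq_true_eq, contains_priority]
    tauto
  have hpair := order_pairwise.filter (fun flag => flags.contains flag)
  exact (PySem.List.sorted_eq_of_perm_of_pairwise_lt _ _ _ hperm hpair).symm
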